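-- pv_equiv track=rewrite | github.com/jrhong95/CodePractice | Programmers/202109/210901_표_편집.py | solution
-- ===== SOURCE A (Python) =====
-- class Node:
--     def __init__(self, data):
--         self.data = data
--         self.prev = None
--         self.next = None
--
-- def solution(n, k, cmd):
--     stack, sheet_size = [], n
--     sheet = Node(0)
--     cur = sheet
--
--     for i in range(1, n):
--         new_sheet = Node(i)
--         cur.next = new_sheet
--         new_sheet.prev = cur
--         cur = new_sheet
--
--     cnt, cur = 0, sheet
--     while cnt < k:
--         cur = cur.next
--         cnt += 1
--
--     for c in cmd:
--         if c[0] == "U":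
--             for i in range(int(c[2:])):
--                 cur = cur.prev
--                 k -= 1
--         elif c[0] == "D":
--             for i in range(int(c[2:])):
--                 cur = cur.next
--                 k += 1
--         elif c[0] == "C":
--             stack.append(cur)
--             if not cur.next:  # if tail
--                 k -= 1
--                 cur = cur.prev
--                 cur.next = None
--             elif not cur.prev:  # if head
--                 cur = cur.next
--                 cur.prev = None
--             else:
--                 cur.prev.next = cur.next
--                 cur.next.prev = cur.prev
--                 cur = cur.next
--         elif c[0] == "Z":
--             pop_node = stack.pop()
--             if not pop_node.next:
--                 pop_node.prev.next = pop_node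
--             elif not pop_node.prev:
--                 pop_node.next.prev = pop_node
--             else:
--                 pop_node.prev.next = pop_node
--                 pop_node.next.prev = pop_node
--
--     ans = ["O"] * n
--     for node in stack:
--         ans[node.data] = "X"
--     return "".join(ans)
-- ===== SOURCE B (Python) =====
-- def _down(deleted, i):
--     i -= 1
--     while i in deleted:
--         i -= 1
--     return i
--
-- def _up(deleted, i):
--     i += 1
--     while i in deleted:
--         i += 1
--     return i
--
-- def solution(n, k, cmd):
--     deleted = set()
--     stack = []
--     cur = max(k, 0)
--     for c in cmd:
--         op = c[:1]
--         if op == "U":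
--             for _ in range(int(c[2:])):
--                 cur = _down(deleted, cur)
--         elif op == "D":
--             for _ in range(int(c[2:])):
--                 cur = _up(deleted, cur)
--         elif op == "C":
--             stack.append(cur)
--             deleted.add(cur)
--             j = cur + 1
--             while j < n and j in deleted:
--                 j += 1
--             cur = j if j < n else _down(deleted, cur)
--         elif op == "Z":
--             deleted.discard(stack.pop())
--     return "".join("X" if i in deleted else "O" for i in range(n))
-- ===== Notes on version B (the rewrite author's own statement) =====
-- stated objective: simpler
-- what changed: The doubly-linked Node list with pointer surgery is replaced by a set of deleted row indices plus an integer cursor: moves and deletes scan over indices skipping deleted rows, undo just discards the popped index from the set.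
import Mathlib
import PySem

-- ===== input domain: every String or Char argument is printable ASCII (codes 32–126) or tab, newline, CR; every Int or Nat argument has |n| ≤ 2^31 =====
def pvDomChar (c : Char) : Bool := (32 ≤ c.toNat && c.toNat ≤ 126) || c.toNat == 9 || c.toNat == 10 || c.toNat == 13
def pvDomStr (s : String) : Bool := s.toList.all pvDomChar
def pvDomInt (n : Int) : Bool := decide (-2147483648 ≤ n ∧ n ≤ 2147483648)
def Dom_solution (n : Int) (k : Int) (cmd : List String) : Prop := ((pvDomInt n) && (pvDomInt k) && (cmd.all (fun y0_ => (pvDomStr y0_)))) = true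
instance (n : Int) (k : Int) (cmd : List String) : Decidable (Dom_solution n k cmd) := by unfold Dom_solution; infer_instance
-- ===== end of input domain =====

-- B replaces A's doubly-linked Node list by a set of deleted row indices plus an integer cursor (simpler; no speed claim).

-- ===== PORT A =====
-- Node pointers are modelled as two maps data ↦ Option data (node identity = its data, distinct 0..n-1);
-- 'None' pointer = none.  Where the Python dereferences None / pops an empty stack / int() fails, the port
-- threads `none` (the crash) and `solution` returns "" there; Pre_solution excludes exactly those inputs.

def pvUpd (f : Int → Option Int) (i : Int) (v : Option Int) : Int → Option Int :=
  fun j => if j = i then v else f j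

/-- `for i in range(1, n): new = Node(i); cur.next = new; new.prev = cur; cur = new` -/
def pvBuild (n : Int) : (Int → Option Int) × (Int → Option Int) :=
  let s := (PySem.List.pyRange 1 n 1).foldl
    (fun (s : (Int → Option Int) × (Int → Option Int) × Int) i =>
      (pvUpd s.1 s.2.2 (some i), pvUpd s.2.1 i (some s.2.2), i))
    ((fun _ => none), (fun _ => none), 0)
  (s.1, s.2.1)

/-- `while cnt < k: cur = cur.next; cnt += 1`  (attribute access on None = crash = outer none) -/
def pvWalk (nxt : Int → Option Int) (k : Int) (cnt : Int) (cur : Option Int) : Option (Option Int) :=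
  if cnt < k then
    match cur with
    | none => none
    | some c => pvWalk nxt k (cnt + 1) (nxt c)
  else some cur
termination_by (k - cnt).toNat
decreasing_by omega

structure PvA where
  stack : List Int
  nxt : Int → Option Int
  prv : Int → Option Int
  kv : Int
  cur : Option Int

/-- `for i in range(t): cur = cur.prev; k -= 1` -/
def pvLoopU (t : Int) (st : PvA) : Option PvA :=
  if 0 < t then
    match st.cur with
    | none => none
    | some c => pvLoopU (t - 1) { st with cur := st.prv c, kv := st.kv - 1 }
  else some st
termination_by t.toNat
decreasing_by omega

/-- `for i in range(t): cur = cur.next; k += 1` -/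
def pvLoopD (t : Int) (st : PvA) : Option PvA :=
  if 0 < t then
    match st.cur with
    | none => none
    | some c => pvLoopD (t - 1) { st with cur := st.nxt c, kv := st.kv + 1 }
  else some st
termination_by t.toNat
decreasing_by omega

def pvStepA (st : PvA) (c : String) : Option PvA :=
  match c.toList.head? with
  | none => none                    -- c[0] on "" raises IndexError
  | some ch =>
    if ch = 'U' then
      match PySem.Int.ofChars? (c.toList.drop 2) with   -- int(c[2:])
      | none => none
      | some t => pvLoopU t st
    else if ch = 'D' then
      match PySem.Int.ofChars? (c.toList.drop 2) with
      | none => none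
      | some t => pvLoopD t st
    else if ch = 'C' then
      match st.cur with
      | none => none                -- cur.next on None
      | some cu =>
        let stack' := st.stack ++ [cu]
        match st.nxt cu with
        | none =>                   -- tail: k -= 1; cur = cur.prev; cur.next = None
          match st.prv cu with
          | none => none
          | some p =>
            some { stack := stack', nxt := pvUpd st.nxt p none, prv := st.prv,
                   kv := st.kv - 1, cur := some p }
        | some nx =>
          match st.prv cu with
          | none =>                 -- head: cur = cur.next; cur.prev = None
            some { stack := stack', nxt := st.nxt, prv := pvUpd st.prv nx none,
                   kv := st.kv, cur := some nx }
          | some p =>               -- middle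
            some { stack := stack', nxt := pvUpd st.nxt p (some nx),
                   prv := pvUpd st.prv nx (some p), kv := st.kv, cur := some nx }
    else if ch = 'Z' then
      match st.stack.getLast? with
      | none => none                -- pop from empty list
      | some pop =>
        let stack' := st.stack.dropLast
        match st.nxt pop with
        | none =>
          match st.prv pop with
          | none => none            -- pop_node.prev.next on None
          | some p => some { st with stack := stack', nxt := pvUpd st.nxt p (some pop) }
        | some nx =>
          match st.prv pop with
          | none => some { st with stack := stack', prv := pvUpd st.prv nx (some pop) }
          | some p =>
            some { st with
                   stack := stack'
                   nxt := pvUpd st.nxt p (some pop)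
                   prv := pvUpd st.prv nx (some pop) }
    else some st

/-- `ans = ["O"] * n; for node in stack: ans[node.data] = "X"; return "".join(ans)` -/
def pvRenderA (n : Int) (stack : List Int) : Option String :=
  match stack.foldl (fun a d => a.bind (fun l => PySem.List.pySet? l d "X"))
      (some (PySem.List.pyRepeat ["O"] n)) with
  | none => none
  | some l => some (PySem.Str.join "" l)

def solution (n : Int) (k : Int) (cmd : List String) : String :=
  match pvWalk (pvBuild n).1 k 0 (some 0) with
  | none => ""
  | some cur0 =>
    match cmd.foldl (fun ost c => ost.bind (fun st => pvStepA st c)) (some ⟨[], (pvBuild n).1, (pvBuild n).2, k, cur0⟩) with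
    | none => ""
    | some st =>
      match pvRenderA n st.stack with
      | none => ""
      | some s => s

-- ===== PORT B =====
-- (transliteration of Source B: set of deleted indices + integer cursor)

-- termination measures for the unbounded while-loop scans (cited by decreasing_by below)
theorem pvFilterLtMono (l : List Int) (c : Int) :
    (l.filter (fun x => decide (x < c))).length ≤ (l.filter (fun x => decide (x ≤ c))).length := by
  induction l with
  | nil => simp
  | cons a l ih =>
    simp only [List.filter_cons]
    by_cases h1 : a < c
    · have h2 : a ≤ c := by omega
      simp [h1, h2]; omega
    · by_cases h2 : a ≤ c <;> simp [h1, h2] <;> omega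

theorem pvFilterLtStrict (l : List Int) (c : Int) (h : c ∈ l) :
    (l.filter (fun x => decide (x < c))).length < (l.filter (fun x => decide (x ≤ c))).length := by
  induction l with
  | nil => cases h
  | cons a l ih =>
    simp only [List.filter_cons]
    rcases List.mem_cons.mp h with rfl | ha
    · have h1 : ¬ (c < c) := by omega
      have h2 : c ≤ c := le_refl c
      have := pvFilterLtMono l c
      simp [h1, h2]; omega
    · have hl := ih ha
      by_cases h1 : a < c
      · have h2 : a ≤ c := by omega
        simp [h1, h2]; omega
      · by_cases h2 : a ≤ c <;> simp [h1, h2] <;> omega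

theorem pvFilterLeLt (l : List Int) (c : Int) (h : c ∈ l) :
    (l.filter (fun x => decide (x ≤ c - 1))).length < (l.filter (fun x => decide (x ≤ c))).length := by
  have e : (fun x : Int => decide (x ≤ c - 1)) = (fun x : Int => decide (x < c)) := by
    funext x; by_cases hx : x < c <;> simp [hx] <;> omega
  rw [e]; exact pvFilterLtStrict l c h

theorem pvFilterGtMono (l : List Int) (c : Int) :
    (l.filter (fun x => decide (c < x))).length ≤ (l.filter (fun x => decide (c ≤ x))).length := by
  induction l with
  | nil => simp
  | cons a l ih =>
    simp only [List.filter_cons]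
    by_cases h1 : c < a
    · have h2 : c ≤ a := by omega
      simp [h1, h2]; omega
    · by_cases h2 : c ≤ a <;> simp [h1, h2] <;> omega

theorem pvFilterGtStrict (l : List Int) (c : Int) (h : c ∈ l) :
    (l.filter (fun x => decide (c < x))).length < (l.filter (fun x => decide (c ≤ x))).length := by
  induction l with
  | nil => cases h
  | cons a l ih =>
    simp only [List.filter_cons]
    rcases List.mem_cons.mp h with rfl | ha
    · have h1 : ¬ (c < c) := by omega
      have h2 : c ≤ c := le_refl c
      have := pvFilterGtMono l c
      simp [h1, h2]; omega
    · have hl := ih ha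
      by_cases h1 : c < a
      · have h2 : c ≤ a := by omega
        simp [h1, h2]; omega
      · by_cases h2 : c ≤ a <;> simp [h1, h2] <;> omega

theorem pvFilterGeLt (l : List Int) (c : Int) (h : c ∈ l) :
    (l.filter (fun x => decide (c + 1 ≤ x))).length < (l.filter (fun x => decide (c ≤ x))).length := by
  have e : (fun x : Int => decide (c + 1 ≤ x)) = (fun x : Int => decide (c < x)) := by
    funext x; by_cases hx : c < x <;> simp [hx] <;> omega
  rw [e]; exact pvFilterGtStrict l c h

/-- `while i in deleted: i -= 1` -/
def pvScanDown (deleted : List Int) (i : Int) : Int :=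
  if i ∈ deleted then pvScanDown deleted (i - 1) else i
termination_by (deleted.filter (fun x => decide (x ≤ i))).length
decreasing_by exact pvFilterLeLt deleted i (by assumption)

/-- `def _down(deleted, i): i -= 1; while i in deleted: i -= 1; return i` -/
def pvDown (deleted : List Int) (i : Int) : Int := pvScanDown deleted (i - 1)

/-- `while i in deleted: i += 1` -/
def pvScanUp (deleted : List Int) (i : Int) : Int :=
  if i ∈ deleted then pvScanUp deleted (i + 1) else i
termination_by (deleted.filter (fun x => decide (i ≤ x))).length
decreasing_by exact pvFilterGeLt deleted i (by assumption)

/-- `def _up(deleted, i): i += 1; while i in deleted: i += 1; return i` -/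
def pvUp (deleted : List Int) (i : Int) : Int := pvScanUp deleted (i + 1)

/-- `j = cur + 1; while j < n and j in deleted: j += 1` (the bounded forward scan of 'C') -/
def pvScanFwd (n : Int) (deleted : List Int) (j : Int) : Int :=
  if j < n ∧ j ∈ deleted then pvScanFwd n deleted (j + 1) else j
termination_by (n - j).toNat
decreasing_by omega

structure PvB where
  deleted : PySem.Set Int
  stack : List Int
  cur : Int

def pvLoopBU (deleted : List Int) (t : Int) (cur : Int) : Int :=
  if 0 < t then pvLoopBU deleted (t - 1) (pvDown deleted cur) else cur
termination_by t.toNat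
decreasing_by omega

def pvLoopBD (deleted : List Int) (t : Int) (cur : Int) : Int :=
  if 0 < t then pvLoopBD deleted (t - 1) (pvUp deleted cur) else cur
termination_by t.toNat
decreasing_by omega

def pvStepB (n : Int) (st : PvB) (c : String) : Option PvB :=
  match c.toList.head? with      -- op = c[:1]; "" matches no branch
  | none => some st
  | some ch =>
    if ch = 'U' then
      match PySem.Int.ofChars? (c.toList.drop 2) with
      | none => none
      | some t => some { st with cur := pvLoopBU st.deleted t st.cur }
    else if ch = 'D' then
      match PySem.Int.ofChars? (c.toList.drop 2) with
      | none => none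
      | some t => some { st with cur := pvLoopBD st.deleted t st.cur }
    else if ch = 'C' then
      let stack' := st.stack ++ [st.cur]
      let del' := PySem.Set.add st.deleted st.cur
      let j := pvScanFwd n del' (st.cur + 1)
      some { deleted := del', stack := stack',
             cur := if j < n then j else pvDown del' st.cur }
    else if ch = 'Z' then
      match st.stack.getLast? with
      | none => none               -- stack.pop() on empty
      | some x =>
        some { deleted := PySem.Set.discard st.deleted x,
               stack := st.stack.dropLast, cur := st.cur }
    else some st

/-- `"".join("X" if i in deleted else "O" for i in range(n))` -/
def pvRenderB (n : Int) (deleted : PySem.Set Int) : String :=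
  PySem.Str.join "" ((PySem.List.pyRange 0 n 1).map
    (fun i => if PySem.Set.contains deleted i then "X" else "O"))

def solution_alt (n : Int) (k : Int) (cmd : List String) : String :=
  match cmd.foldl (fun ost c => ost.bind (fun st => pvStepB n st c))
      (some ⟨PySem.Set.empty, [], max k 0⟩) with
  | none => ""
  | some st => pvRenderB n st.deleted

-- ===== PRECONDITION & SPEC =====

-- Pre_solution holds EXACTLY when the Python A raises no exception.  A crashes when a command string is
-- empty or its count does not parse as an int, when the initial position k lies beyond the built chain,
-- when a U/D move steps past a dangling (off-table) cursor, when C is issued with no live neighbour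
-- (or a dangling cursor), or when Z pops an empty stack.  Whether a given command is legal depends on
-- the table state it is applied to, so crash-freedom is necessarily a condition threaded through the
-- command list: pvOk below is the minimal abstract legality check (deleted-index stack + optional
-- cursor index); it is not a copy of either port and computes no output.

-- the forward/backward live-index scans of the legality check (structural fuel recursion so that
-- the Decidable Pre_ evaluates in the kernel; the fuel strictly exceeds the scan length)
def upFGo (S : List Int) (n : Int) : Nat → Int → Option Int
  | 0, _ => none
  | fuel + 1, j => if j < n then (if j ∈ S then upFGo S n fuel (j + 1) else some j) else none

def dnFGo (S : List Int) : Nat → Int → Option Int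
  | 0, _ => none
  | fuel + 1, j => if 0 ≤ j then (if j ∈ S then dnFGo S fuel (j - 1) else some j) else none

def pvNextL (n : Int) (S : List Int) (c : Int) : Option Int := upFGo S n ((n - (c + 1)).toNat + 1) (c + 1)
def pvPrevL (S : List Int) (c : Int) : Option Int := dnFGo S ((c - 1 + 1).toNat + 1) (c - 1)

/-- m cursor steps; the cursor may fall off the table (`some none`) only on the LAST step
    (A stores the None and crashes only on the next dereference); `none` = A crashes inside the loop. -/
def pvIter (step : Int → Option Int) : Nat → Int → Option (Option Int)
  | 0, c => some (some c)
  | m + 1, c =>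
    match step c with
    | some c' => pvIter step m c'
    | none => if m = 0 then some none else none

def pvOk (n : Int) : List Int → Option Int → List String → Bool
  | _, _, [] => true
  | S, cur, c :: r =>
    match c.toList.head? with
    | none => false
    | some ch =>
      if ch = 'U' then
        match PySem.Int.ofChars? (c.toList.drop 2) with
        | none => false
        | some t =>
          if t ≤ 0 then pvOk n S cur r
          else match cur with
            | none => false
            | some cc =>
              match pvIter (pvPrevL S) t.toNat cc with
              | none => false
              | some cur' => pvOk n S cur' r
      else if ch = 'D' then
        match PySem.Int.ofChars? (c.toList.drop 2) with
        | none => false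
        | some t =>
          if t ≤ 0 then pvOk n S cur r
          else match cur with
            | none => false
            | some cc =>
              match pvIter (pvNextL n S) t.toNat cc with
              | none => false
              | some cur' => pvOk n S cur' r
      else if ch = 'C' then
        match cur with
        | none => false
        | some cc =>
          match pvNextL n S cc with
          | some j => pvOk n (S ++ [cc]) (some j) r
          | none =>
            match pvPrevL S cc with
            | none => false
            | some p => pvOk n (S ++ [cc]) (some p) r
      else if ch = 'Z' then
        match S.getLast? with
        | none => false
        | some _ => pvOk n S.dropLast cur r
      else pvOk n S cur r

def Pre_solution (n : Int) (k : Int) (cmd : List String) : Prop :=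
  k ≤ max n 1 ∧ pvOk n [] (if k < max n 1 then some (max k 0) else none) cmd = true

instance (n : Int) (k : Int) (cmd : List String) : Decidable (Pre_solution n k cmd) := by
  unfold Pre_solution; infer_instance

def pvWitness_solution : Int × Int × List String := (3, 0, ["D 1", "C", "U 1", "Z"])

def Spec_solution (n : Int) (k : Int) (cmd : List String) (out : String) : Prop :=
  out = solution_alt n k cmd
instance (n : Int) (k : Int) (cmd : List String) (out : String) : Decidable (Spec_solution n k cmd out) := by
  unfold Spec_solution; infer_instance

-- ===== CLAIM (what is proved, stated in full; the proofs are below) =====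
def Claim_equal_solution : Prop := ∀ (n : Int) (k : Int) (cmd : List String), Dom_solution n k cmd → Pre_solution n k cmd → Spec_solution n k cmd (solution n k cmd)

-- ===== LEMMAS AND PROOFS =====

/-- first live index ≥ j below n : `none` = no live successor (A's `next` pointer is None there). -/
def upF (S : List Int) (n : Int) (j : Int) : Option Int :=
  if j < n then (if j ∈ S then upF S n (j + 1) else some j) else none
termination_by (n - j).toNat
decreasing_by omega

/-- last live index ≤ j above 0 : `none` = no live predecessor (A's `prev` pointer is None there). -/
def dnF (S : List Int) (j : Int) : Option Int :=
  if 0 ≤ j then (if j ∈ S then dnF S (j - 1) else some j) else none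
termination_by (j + 1).toNat
decreasing_by omega

-- ---------- characterizations of the canonical scans ----------

theorem upFGo_eq (S : List Int) (n : Int) : ∀ (fuel : Nat) (j : Int), (n - j).toNat < fuel →
    upFGo S n fuel j = upF S n j := by
  intro fuel
  induction fuel with
  | zero => intro j h; omega
  | succ fuel ih =>
    intro j h
    rw [upFGo, upF]
    by_cases hj : j < n
    · rw [if_pos hj, if_pos hj]
      by_cases hm : j ∈ S
      · rw [if_pos hm, if_pos hm, ih (j + 1) (by omega)]
      · rw [if_neg hm, if_neg hm]
    · rw [if_neg hj, if_neg hj]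

theorem dnFGo_eq (S : List Int) : ∀ (fuel : Nat) (j : Int), (j + 1).toNat < fuel →
    dnFGo S fuel j = dnF S j := by
  intro fuel
  induction fuel with
  | zero => intro j h; omega
  | succ fuel ih =>
    intro j h
    rw [dnFGo, dnF]
    by_cases hj : 0 ≤ j
    · rw [if_pos hj, if_pos hj]
      by_cases hm : j ∈ S
      · rw [if_pos hm, if_pos hm, ih (j - 1) (by omega)]
      · rw [if_neg hm, if_neg hm]
    · rw [if_neg hj, if_neg hj]

theorem pvNextL_eq (n : Int) (S : List Int) (c : Int) : pvNextL n S c = upF S n (c + 1) := by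
  unfold pvNextL
  exact upFGo_eq S n _ (c + 1) (by omega)

theorem pvPrevL_eq (S : List Int) (c : Int) : pvPrevL S c = dnF S (c - 1) := by
  unfold pvPrevL
  exact dnFGo_eq S _ (c - 1) (by omega)

theorem upF_some_iff (S : List Int) (n : Int) : ∀ j r : Int,
    upF S n j = some r ↔ (j ≤ r ∧ r < n ∧ r ∉ S ∧ ∀ t, j ≤ t → t < r → t ∈ S) := by
  intro j r
  induction j using upF.induct (S := S) (n := n) with
  | case1 j hj hmem ih =>
    rw [upF, if_pos hj, if_pos hmem, ih]
    constructor
    · rintro ⟨h1, h2, h3, h4⟩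
      refine ⟨by omega, h2, h3, ?_⟩
      intro t ht1 ht2
      rcases eq_or_lt_of_le ht1 with rfl | h
      · exact hmem
      · exact h4 t (by omega) ht2
    · rintro ⟨h1, h2, h3, h4⟩
      have : j ≠ r := fun h => h3 (h ▸ hmem)
      exact ⟨by omega, h2, h3, fun t ht1 ht2 => h4 t (by omega) ht2⟩
  | case2 j hj hmem =>
    rw [upF, if_pos hj, if_neg hmem]
    constructor
    · rintro h
      injection h with h; subst h
      exact ⟨le_refl _, hj, hmem, by omega⟩
    · rintro ⟨h1, h2, h3, h4⟩
      rcases eq_or_lt_of_le h1 with rfl | h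
      · rfl
      · exact absurd (h4 j (le_refl _) h) hmem
  | case3 j hj =>
    rw [upF, if_neg hj]
    simp only [reduceCtorEq, false_iff]; push_neg
    intro h1 h2; omega

theorem upF_none_iff (S : List Int) (n : Int) : ∀ j : Int,
    upF S n j = none ↔ ∀ t, j ≤ t → t < n → t ∈ S := by
  intro j
  induction j using upF.induct (S := S) (n := n) with
  | case1 j hj hmem ih =>
    rw [upF, if_pos hj, if_pos hmem, ih]
    constructor
    · intro h t ht1 ht2
      rcases eq_or_lt_of_le ht1 with rfl | h'
      · exact hmem
      · exact h t (by omega) ht2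
    · intro h t ht1 ht2; exact h t (by omega) ht2
  | case2 j hj hmem =>
    rw [upF, if_pos hj, if_neg hmem]
    simp only [reduceCtorEq, false_iff]; push_neg
    exact ⟨j, le_refl _, hj, hmem⟩
  | case3 j hj =>
    rw [upF, if_neg hj]
    simp only [true_iff]
    intro t h1 h2; omega

theorem dnF_some_iff (S : List Int) : ∀ j r : Int,
    dnF S j = some r ↔ (r ≤ j ∧ 0 ≤ r ∧ r ∉ S ∧ ∀ t, r < t → t ≤ j → t ∈ S) := by
  intro j r
  induction j using dnF.induct (S := S) with
  | case1 j hj hmem ih =>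
    rw [dnF, if_pos hj, if_pos hmem, ih]
    constructor
    · rintro ⟨h1, h2, h3, h4⟩
      refine ⟨by omega, h2, h3, ?_⟩
      intro t ht1 ht2
      rcases eq_or_lt_of_le ht2 with rfl | h
      · exact hmem
      · exact h4 t ht1 (by omega)
    · rintro ⟨h1, h2, h3, h4⟩
      have : j ≠ r := fun h => h3 (h ▸ hmem)
      exact ⟨by omega, h2, h3, fun t ht1 ht2 => h4 t ht1 (by omega)⟩
  | case2 j hj hmem =>
    rw [dnF, if_pos hj, if_neg hmem]
    constructor
    · rintro h
      injection h with h; subst h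
      exact ⟨le_refl _, hj, hmem, by omega⟩
    · rintro ⟨h1, h2, h3, h4⟩
      rcases eq_or_lt_of_le h1 with rfl | h
      · rfl
      · exact absurd (h4 j h (le_refl _)) hmem
  | case3 j hj =>
    rw [dnF, if_neg hj]
    simp only [reduceCtorEq, false_iff]; push_neg
    intro h1 h2; omega

theorem dnF_none_iff (S : List Int) : ∀ j : Int,
    dnF S j = none ↔ ∀ t, 0 ≤ t → t ≤ j → t ∈ S := by
  intro j
  induction j using dnF.induct (S := S) with
  | case1 j hj hmem ih =>
    rw [dnF, if_pos hj, if_pos hmem, ih]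
    constructor
    · intro h t ht1 ht2
      rcases eq_or_lt_of_le ht2 with rfl | h'
      · exact hmem
      · exact h t ht1 (by omega)
    · intro h t ht1 ht2; exact h t ht1 (by omega)
  | case2 j hj hmem =>
    rw [dnF, if_pos hj, if_neg hmem]
    simp only [reduceCtorEq, false_iff]; push_neg
    exact ⟨j, hj, le_refl _, hmem⟩
  | case3 j hj =>
    rw [dnF, if_neg hj]
    simp only [true_iff]
    intro t h1 h2; omega

-- bridges: B's while-loop scans agree with the canonical scans where those return
theorem scanFwd_of_upF_some {S : List Int} {n j r : Int} (h : upF S n j = some r) :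
    pvScanFwd n S j = r := by
  induction j using upF.induct (S := S) (n := n) with
  | case1 j hj hmem ih =>
    rw [upF, if_pos hj, if_pos hmem] at h
    rw [pvScanFwd, if_pos ⟨hj, hmem⟩]
    exact ih h
  | case2 j hj hmem =>
    rw [upF, if_pos hj, if_neg hmem] at h
    injection h with h; subst h
    rw [pvScanFwd, if_neg (by tauto)]
  | case3 j hj =>
    rw [upF, if_neg hj] at h; cases h

theorem scanFwd_not_lt_of_upF_none {S : List Int} {n j : Int} (h : upF S n j = none) :
    ¬ pvScanFwd n S j < n := by
  induction j using upF.induct (S := S) (n := n) with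
  | case1 j hj hmem ih =>
    rw [upF, if_pos hj, if_pos hmem] at h
    rw [pvScanFwd, if_pos ⟨hj, hmem⟩]
    exact ih h
  | case2 j hj hmem =>
    rw [upF, if_pos hj, if_neg hmem] at h; cases h
  | case3 j hj =>
    rw [pvScanFwd, if_neg (by tauto)]
    exact hj

theorem scanDown_of_dnF_some {S : List Int} {j r : Int} (h : dnF S j = some r) :
    pvScanDown S j = r := by
  induction j using dnF.induct (S := S) with
  | case1 j hj hmem ih =>
    rw [dnF, if_pos hj, if_pos hmem] at h
    rw [pvScanDown, if_pos hmem]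
    exact ih h
  | case2 j hj hmem =>
    rw [dnF, if_pos hj, if_neg hmem] at h
    injection h with h; subst h
    rw [pvScanDown, if_neg hmem]
  | case3 j hj =>
    rw [dnF, if_neg hj] at h; cases h

theorem scanUp_of_bounds (S : List Int) : ∀ (fuel : Nat) (j r : Int), (r - j).toNat = fuel →
    j ≤ r → r ∉ S → (∀ t, j ≤ t → t < r → t ∈ S) → pvScanUp S j = r := by
  intro fuel
  induction fuel with
  | zero =>
    intro j r hf h1 h2 h3
    have : j = r := by omega
    subst this
    rw [pvScanUp, if_neg h2]
  | succ fuel ih =>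
    intro j r hf h1 h2 h3
    have hjr : j < r := by omega
    have hjS : j ∈ S := h3 j (le_refl _) hjr
    rw [pvScanUp, if_pos hjS]
    exact ih (j + 1) r (by omega) (by omega) h2 (fun t ht1 ht2 => h3 t (by omega) ht2)

theorem scanUp_of_upF_some {S : List Int} {n j r : Int} (h : upF S n j = some r) :
    pvScanUp S j = r := by
  rcases (upF_some_iff S n j r).mp h with ⟨h1, _, h3, h4⟩
  exact scanUp_of_bounds S (r - j).toNat j r rfl h1 h3 h4

-- ---------- stale-pointer prefixes ----------

def upTo (S : List Int) (i : Int) : List Int := S.takeWhile (fun x => x ≠ i)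

theorem upTo_of_not_mem {S : List Int} {i : Int} (h : i ∉ S) : upTo S i = S := by
  induction S with
  | nil => rfl
  | cons a S ih =>
    have ha : a ≠ i := fun e => h (e ▸ List.mem_cons_self)
    have hm : i ∉ S := fun hm => h (List.mem_cons_of_mem _ hm)
    unfold upTo
    rw [List.takeWhile_cons, if_pos (by simp [ha])]
    have := ih hm
    unfold upTo at this
    rw [this]

theorem upTo_append_of_mem {S : List Int} (T : List Int) {i : Int} (h : i ∈ S) :
    upTo (S ++ T) i = upTo S i := by
  induction S with
  | nil => cases h
  | cons a S ih =>
    by_cases ha : a = i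
    · subst ha
      unfold upTo
      rw [List.cons_append, List.takeWhile_cons, List.takeWhile_cons]
      simp
    · rcases List.mem_cons.mp h with rfl | hm
      · exact absurd rfl ha
      · unfold upTo
        rw [List.cons_append, List.takeWhile_cons, List.takeWhile_cons,
            if_pos (by simp [ha]), if_pos (by simp [ha])]
        have := ih hm
        unfold upTo at this
        rw [this]

theorem upTo_append_self {S : List Int} {i : Int} (h : i ∉ S) : upTo (S ++ [i]) i = S := by
  induction S with
  | nil => simp [upTo, List.takeWhile_cons]
  | cons a S ih =>
    have ha : a ≠ i := fun e => h (e ▸ List.mem_cons_self)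
    have hm : i ∉ S := fun hm => h (List.mem_cons_of_mem _ hm)
    unfold upTo
    rw [List.cons_append, List.takeWhile_cons, if_pos (by simp [ha])]
    have := ih hm
    unfold upTo at this
    rw [this]

-- ---------- the linked-list invariant ----------

def cN (n : Int) (S : List Int) (i : Int) : Option Int := upF (upTo S i) n (i + 1)
def cP (S : List Int) (i : Int) : Option Int := dnF (upTo S i) (i - 1)

def InvA (n : Int) (S : List Int) (curO : Option Int) (st : PvA) : Prop :=
  st.stack = S ∧ st.cur = curO ∧ S.Nodup ∧ (∀ s ∈ S, 0 ≤ s ∧ s < n) ∧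
  (S ≠ [] → ∃ j, 0 ≤ j ∧ j < n ∧ j ∉ S) ∧
  (∀ cc, curO = some cc → 0 ≤ cc ∧ cc < max n 1 ∧ cc ∉ S) ∧
  (∀ i, 0 ≤ i → i < max n 1 → st.nxt i = cN n S i ∧ st.prv i = cP S i)

-- ---------- initial chain ----------

theorem pvBuild_aux (m : Nat) :
    (∀ i : Int, (((List.range m).map (fun kk : Nat => (1 : Int) + kk)).foldl
      (fun (s : (Int → Option Int) × (Int → Option Int) × Int) i =>
        (pvUpd s.1 s.2.2 (some i), pvUpd s.2.1 i (some s.2.2), i))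
      ((fun _ => none), (fun _ => none), 0)).1 i
        = if 0 ≤ i ∧ i < (m : Int) then some (i + 1) else none) ∧
    (∀ i : Int, (((List.range m).map (fun kk : Nat => (1 : Int) + kk)).foldl
      (fun (s : (Int → Option Int) × (Int → Option Int) × Int) i =>
        (pvUpd s.1 s.2.2 (some i), pvUpd s.2.1 i (some s.2.2), i))
      ((fun _ => none), (fun _ => none), 0)).2.1 i
        = if 1 ≤ i ∧ i ≤ (m : Int) then some (i - 1) else none) ∧
    (((List.range m).map (fun kk : Nat => (1 : Int) + kk)).foldl
      (fun (s : (Int → Option Int) × (Int → Option Int) × Int) i =>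
        (pvUpd s.1 s.2.2 (some i), pvUpd s.2.1 i (some s.2.2), i))
      ((fun _ => none), (fun _ => none), 0)).2.2 = (m : Int) := by
  induction m with
  | zero =>
    refine ⟨?_, ?_, rfl⟩ <;> intro i <;> rw [if_neg (by omega)] <;> rfl
  | succ m ih =>
    rw [List.range_succ, List.map_append, List.foldl_append]
    rcases ih with ⟨ih1, ih2, ih3⟩
    simp only [List.map_cons, List.map_nil, List.foldl_cons, List.foldl_nil]
    generalize hGen : (((List.range m).map (fun kk : Nat => (1 : Int) + kk)).foldl
      (fun (s : (Int → Option Int) × (Int → Option Int) × Int) i =>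
        (pvUpd s.1 s.2.2 (some i), pvUpd s.2.1 i (some s.2.2), i))
      ((fun _ => none), (fun _ => none), 0)) = s0 at ih1 ih2 ih3 ⊢
    refine ⟨?_, ?_, ?_⟩
    · intro i
      simp only [pvUpd]
      rw [ih3, ih1 i]
      by_cases hi : i = (m : Int)
      · subst hi
        rw [if_pos rfl, if_pos (by push_cast; omega)]
        push_cast; ring_nf
      · rw [if_neg hi]
        by_cases h2 : 0 ≤ i ∧ i < (m : Int)
        · rw [if_pos h2, if_pos (by push_cast; omega)]
        · rw [if_neg h2, if_neg (by push_cast; omega)]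
    · intro i
      simp only [pvUpd]
      rw [ih3, ih2 i]
      by_cases hi : i = (1 : Int) + (m : Int)
      · rw [if_pos hi, if_pos (by push_cast; omega)]
        rw [hi]; ring_nf
      · rw [if_neg hi]
        by_cases h2 : 1 ≤ i ∧ i ≤ (m : Int)
        · rw [if_pos h2, if_pos (by push_cast; omega)]
        · rw [if_neg h2, if_neg (by push_cast; omega)]
    · push_cast; ring_nf

theorem pvBuild_nxt (n : Int) (i : Int) :
    (pvBuild n).1 i = if 0 ≤ i ∧ i < n - 1 then some (i + 1) else none := by
  unfold pvBuild
  rw [PySem.List.pyRange_one]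
  have h := (pvBuild_aux (n - 1).toNat).1 i
  simp only at h ⊢
  rw [h]
  by_cases h2 : 0 ≤ i ∧ i < n - 1
  · rw [if_pos (by omega), if_pos h2]
  · rw [if_neg (by omega), if_neg h2]

theorem pvBuild_prv (n : Int) (i : Int) :
    (pvBuild n).2 i = if 1 ≤ i ∧ i ≤ n - 1 then some (i - 1) else none := by
  unfold pvBuild
  rw [PySem.List.pyRange_one]
  have h := (pvBuild_aux (n - 1).toNat).2.1 i
  simp only at h ⊢
  rw [h]
  by_cases h2 : 1 ≤ i ∧ i ≤ n - 1
  · rw [if_pos (by omega), if_pos h2]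
  · rw [if_neg (by omega), if_neg h2]

-- ---------- the initial walk ----------

theorem pvWalk_stop {nxt : Int → Option Int} {k cnt : Int} (h : k ≤ cnt) (cur : Option Int) :
    pvWalk nxt k cnt cur = some cur := by
  rw [pvWalk.eq_def, if_neg (by omega)]

theorem pvWalk_chain (n k : Int) : ∀ (fuel : Nat) (cnt j : Int), (k - cnt).toNat = fuel →
    cnt ≤ k → 0 ≤ j → j < max n 1 → k - cnt ≤ max n 1 - j →
    pvWalk (pvBuild n).1 k cnt (some j)
      = some (if j + (k - cnt) < max n 1 then some (j + (k - cnt)) else none) := by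
  intro fuel
  induction fuel with
  | zero =>
    intro cnt j hf h0 h1 h2 h3
    have : k = cnt := by omega
    subst this
    rw [pvWalk_stop (le_refl _)]
    rw [if_pos (by omega)]
    norm_num
  | succ fuel ih =>
    intro cnt j hf h0 h1 h2 h3
    have hlt : cnt < k := by omega
    rw [pvWalk.eq_def, if_pos hlt]
    simp only
    rw [pvBuild_nxt]
    by_cases hj : j < max n 1 - 1
    · rw [if_pos ⟨h1, by omega⟩]
      rw [ih (cnt + 1) (j + 1) (by omega) (by omega) (by omega) (by omega) (by omega)]
      by_cases hend : j + (k - cnt) < max n 1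
      · rw [if_pos (by omega), if_pos hend]
        norm_num; omega
      · rw [if_neg (by omega), if_neg hend]
    · rw [if_neg (by omega)]
      rw [pvWalk.eq_def]
      rw [if_neg (by omega)]
      rw [if_neg (by omega)]

theorem pvWalk_init (n k : Int) (hk : k ≤ max n 1) :
    pvWalk (pvBuild n).1 k 0 (some 0)
      = some (if k < max n 1 then some (max k 0) else none) := by
  by_cases hk0 : k ≤ 0
  · rw [pvWalk_stop hk0]
    rw [if_pos (by omega)]
    have : max k 0 = 0 := by omega
    rw [this]
  · have h := pvWalk_chain n k (k - 0).toNat 0 0 rfl (by omega) (by omega) (by omega) (by omega)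
    rw [h]
    have h1 : (0 : Int) + (k - 0) = k := by ring
    rw [h1]
    have h2 : max k 0 = k := by omega
    rw [h2]

-- ---------- no-op commands ----------

theorem pvStepA_junk {st : PvA} {c : String} {ch : Char} (h : c.toList.head? = some ch)
    (hU : ch ≠ 'U') (hD : ch ≠ 'D') (hC : ch ≠ 'C') (hZ : ch ≠ 'Z') :
    pvStepA st c = some st := by
  unfold pvStepA
  rw [h]
  simp [hU, hD, hC, hZ]

theorem pvStepB_junk {n : Int} {st : PvB} {c : String} {ch : Char} (h : c.toList.head? = some ch)
    (hU : ch ≠ 'U') (hD : ch ≠ 'D') (hC : ch ≠ 'C') (hZ : ch ≠ 'Z') :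
    pvStepB n st c = some st := by
  unfold pvStepB
  rw [h]
  simp [hU, hD, hC, hZ]

-- ---------- final rendering ----------

theorem pvRender_fold (S : List Int) : ∀ (l : List String), (∀ s ∈ S, 0 ≤ s ∧ s < (l.length : Int)) →
    ∃ r, S.foldl (fun a d => a.bind (fun l => PySem.List.pySet? l d "X")) (some l) = some r ∧
      r.length = l.length ∧ ∀ i : Nat, r[i]? = if (i : Int) ∈ S then some "X" else l[i]? := by
  induction S with
  | nil =>
    intro l _
    exact ⟨l, rfl, rfl, by intro i; rw [if_neg (by simp)]⟩
  | cons s S ih =>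
    intro l hb
    rcases hb s List.mem_cons_self with ⟨hs0, hs1⟩
    have hset : PySem.List.pySet? l s "X" = some (l.set s.toNat "X") := by
      have hnat : ((s.toNat : Nat) : Int) = s := by omega
      have h := PySem.List.pySet?_natCast l s.toNat "X" (by omega)
      rw [hnat] at h
      exact h
    rcases ih (l.set s.toNat "X")
        (by intro x hx; rcases hb x (List.mem_cons_of_mem _ hx) with ⟨h1, h2⟩
            simp only [List.length_set]; exact ⟨h1, h2⟩) with ⟨r, hr, hlen, helt⟩
    refine ⟨r, ?_, by rw [hlen]; simp, ?_⟩
    · simpa only [List.foldl_cons, Option.bind_some, hset] using hr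
    · intro i
      rw [helt i]
      by_cases hm : (i : Int) ∈ S
      · rw [if_pos hm, if_pos (List.mem_cons_of_mem _ hm)]
      · rw [if_neg hm]
        by_cases hi : (i : Int) = s
        · have : i = s.toNat := by omega
          subst this
          rw [if_pos (by rw [hi]; exact List.mem_cons_self)]
          rw [List.getElem?_set_self (by omega)]
        · rw [if_neg (by simp [hm, hi])]
          rw [List.getElem?_set_ne (by omega)]

theorem pvRender_eq (n : Int) (S : List Int) (hS : ∀ s ∈ S, 0 ≤ s ∧ s < n) :
    pvRenderA n S = some (pvRenderB n S) := by
  unfold pvRenderA pvRenderB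
  rw [PySem.List.pyRepeat_singleton]
  rcases pvRender_fold S (List.replicate n.toNat "O")
      (by intro x hx; rcases hS x hx with ⟨h1, h2⟩
          rw [List.length_replicate]; exact ⟨h1, by omega⟩) with ⟨r, hr, hlen, helt⟩
  rw [hr]
  have hm : (match some r with | none => none | some l => some (PySem.Str.join "" l))
      = some (PySem.Str.join "" r) := rfl
  rw [hm]
  refine congrArg (fun l => some (PySem.Str.join "" l)) (List.ext_getElem? fun i => ?_)
  rw [helt i]
  rw [List.getElem?_map, PySem.List.getElem?_pyRange_one, List.getElem?_replicate]
  by_cases hm : (i : Int) ∈ S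
  · have hi : i < n.toNat := by
      rcases hS _ hm with ⟨h1, h2⟩
      omega
    have hc : PySem.Set.contains S ((0 : Int) + i) = true := by
      rw [PySem.Set.contains_iff]
      simpa using hm
    simp [hm, hi, hc]
  · by_cases hi : i < n.toNat
    · have hc : PySem.Set.contains S ((0 : Int) + i) = false := by
        rw [← Bool.not_eq_true, PySem.Set.contains_iff]
        simpa using hm
      simp [hm, hi, hc]
    · simp [hm, hi]

-- ---------- constructors for the canonical scans ----------

theorem upF_eq_of {S : List Int} {n j r : Int} (h1 : j ≤ r) (h2 : r < n) (h3 : r ∉ S)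
    (h4 : ∀ t, j ≤ t → t < r → t ∈ S) : upF S n j = some r :=
  (upF_some_iff S n j r).mpr ⟨h1, h2, h3, h4⟩

theorem dnF_eq_of {S : List Int} {j r : Int} (h1 : r ≤ j) (h2 : 0 ≤ r) (h3 : r ∉ S)
    (h4 : ∀ t, r < t → t ≤ j → t ∈ S) : dnF S j = some r :=
  (dnF_some_iff S j r).mpr ⟨h1, h2, h3, h4⟩

theorem cN_not_mem {S : List Int} {i : Int} (n : Int) (h : i ∉ S) :
    cN n S i = upF S n (i + 1) := by unfold cN; rw [upTo_of_not_mem h]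
theorem cP_not_mem {S : List Int} {i : Int} (h : i ∉ S) :
    cP S i = dnF S (i - 1) := by unfold cP; rw [upTo_of_not_mem h]

-- ---------- how the canonical pointers react to pushing x ----------

theorem mem_app_iff {S : List Int} {x t : Int} : t ∈ S ++ [x] ↔ t ∈ S ∨ t = x := by simp

theorem cN_insert_mem {S : List Int} {x i : Int} (n : Int) (h : i ∈ S) :
    cN n (S ++ [x]) i = cN n S i := by unfold cN; rw [upTo_append_of_mem _ h]
theorem cP_insert_mem {S : List Int} {x i : Int} (h : i ∈ S) :
    cP (S ++ [x]) i = cP S i := by unfold cP; rw [upTo_append_of_mem _ h]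
theorem cN_insert_self {S : List Int} {x : Int} (n : Int) (h : x ∉ S) :
    cN n (S ++ [x]) x = cN n S x := by
  unfold cN; rw [upTo_append_self h, upTo_of_not_mem h]
theorem cP_insert_self {S : List Int} {x : Int} (h : x ∉ S) :
    cP (S ++ [x]) x = cP S x := by
  unfold cP; rw [upTo_append_self h, upTo_of_not_mem h]

/-- pushing x does not change the live successor of a live i that is not x's live predecessor -/
theorem cN_insert_live {S : List Int} {x i : Int} (n : Int) (hxS : x ∉ S) (hiS : i ∉ S)
    (hix : i ≠ x) (hi0 : 0 ≤ i) (hnb : dnF S (x - 1) ≠ some i) :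
    cN n (S ++ [x]) i = cN n S i := by
  have hiS' : i ∉ S ++ [x] := by rw [mem_app_iff]; tauto
  rw [cN_not_mem n hiS', cN_not_mem n hiS]
  cases hI : upF S n (i + 1) with
  | some r =>
    rcases (upF_some_iff S n (i + 1) r).mp hI with ⟨h1, h2, h3, h4⟩
    have hrx : r ≠ x := by
      intro hrx; subst hrx
      exact hnb (dnF_eq_of (by omega) (by omega)
        hiS (fun t ht1 ht2 => h4 t (by omega) (by omega)))
    exact upF_eq_of h1 h2 (by rw [mem_app_iff]; tauto)
      (fun t ht1 ht2 => List.mem_append_left _ (h4 t ht1 ht2))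
  | none =>
    rw [upF_none_iff] at hI ⊢
    exact fun t ht1 ht2 => List.mem_append_left _ (hI t ht1 ht2)

/-- pushing x does not change the live predecessor of a live i that is not x's live successor -/
theorem cP_insert_live {S : List Int} {x i n : Int} (hxS : x ∉ S) (hiS : i ∉ S)
    (hix : i ≠ x) (hi1 : i < n) (hx0 : 0 ≤ x) (hnb : upF S n (x + 1) ≠ some i) :
    cP (S ++ [x]) i = cP S i := by
  have hiS' : i ∉ S ++ [x] := by rw [mem_app_iff]; tauto
  rw [cP_not_mem hiS', cP_not_mem hiS]
  cases hI : dnF S (i - 1) with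
  | some r =>
    rcases (dnF_some_iff S (i - 1) r).mp hI with ⟨h1, h2, h3, h4⟩
    have hrx : r ≠ x := by
      intro hrx; subst hrx
      exact hnb (upF_eq_of (by omega) hi1
        hiS (fun t ht1 ht2 => h4 t (by omega) (by omega)))
    exact dnF_eq_of h1 h2 (by rw [mem_app_iff]; tauto)
      (fun t ht1 ht2 => List.mem_append_left _ (h4 t ht1 ht2))
  | none =>
    rw [dnF_none_iff] at hI ⊢
    exact fun t ht1 ht2 => List.mem_append_left _ (hI t ht1 ht2)

-- ---------- PySem.Set on our stacks ----------

theorem pvSet_add_eq {S : List Int} {x : Int} (h : x ∉ S) :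
    PySem.Set.add S x = S ++ [x] := by
  simp [PySem.Set.add]
  exact h

theorem pvSet_discard_last {S : List Int} {x : Int} (h : x ∉ S) :
    PySem.Set.discard (S ++ [x]) x = S := by
  unfold PySem.Set.discard
  simp
  exact fun a ha hax => h (hax ▸ ha)

-- ---------- the 'C' step in lockstep ----------

theorem pvStep_C {n : Int} {S : List Int} {cur cur' : Int} {st : PvA} {c : String}
    (hInv : InvA n S (some cur) st) (hc : c.toList.head? = some 'C')
    (hnb : pvNextL n S cur = some cur' ∨ (pvNextL n S cur = none ∧ pvPrevL S cur = some cur')) :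
    ∃ st', pvStepA st c = some st' ∧ InvA n (S ++ [cur]) (some cur') st' ∧
      pvStepB n ⟨S, S, cur⟩ c = some ⟨S ++ [cur], S ++ [cur], cur'⟩ := by
  obtain ⟨hstack, hcur, hnd, hbound, _hlive, hcurb, hmaps⟩ := hInv
  obtain ⟨hc0, hc1m, hcS⟩ := hcurb cur rfl
  -- a live neighbour exists, hence n ≥ 1 and the cursor lies inside [0, n)
  rw [pvNextL_eq] at hnb
  rw [pvPrevL_eq] at hnb
  have hn1 : 1 ≤ n := by
    rcases hnb with h | ⟨_, h⟩
    · rcases (upF_some_iff S n (cur + 1) cur').mp h with ⟨h1, h2, _, _⟩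
      omega
    · rcases (dnF_some_iff S (cur - 1) cur').mp h with ⟨h1, h2, _, _⟩
      omega
  have hmx : max n 1 = n := by omega
  rw [hmx] at hc1m hmaps
  have hc1 : cur < n := hc1m
  have hnd' : (S ++ [cur]).Nodup := by
    simp [List.nodup_append, hnd, hcS]
    exact fun a ha he => hcS (he ▸ ha)
  have hbound' : ∀ s ∈ S ++ [cur], 0 ≤ s ∧ s < n := by
    intro s hs
    rcases mem_app_iff.mp hs with h | rfl
    · exact hbound s h
    · exact ⟨hc0, hc1⟩
  have hnxtc : st.nxt cur = upF S n (cur + 1) := by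
    rw [(hmaps cur hc0 hc1).1, cN_not_mem n hcS]
  have hprvc : st.prv cur = dnF S (cur - 1) := by
    rw [(hmaps cur hc0 hc1).2, cP_not_mem hcS]
  have haddeq : PySem.Set.add S cur = S ++ [cur] := pvSet_add_eq hcS
  rcases hnb with hNB | ⟨hNB, hPB⟩
  · -- there is a live successor nx = cur'
    have hN : upF S n (cur + 1) = some cur' := hNB
    rcases (upF_some_iff _ _ _ _).mp hN with ⟨hnx1, hnx2, hnxS, hnxgap⟩
    have hnxS' : cur' ∉ S ++ [cur] := by
      rw [mem_app_iff]; push_neg; exact ⟨hnxS, by omega⟩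
    have hupF' : upF (S ++ [cur]) n (cur + 1) = some cur' :=
      upF_eq_of hnx1 hnx2 hnxS' (fun t ht1 ht2 => List.mem_append_left _ (hnxgap t ht1 ht2))
    have hscan : pvScanFwd n (S ++ [cur]) (cur + 1) = cur' := scanFwd_of_upF_some hupF'
    have hnxtcN : st.nxt cur = some cur' := by rw [hnxtc, hN]
    have hlive' : (S ++ [cur]) ≠ [] → ∃ j, 0 ≤ j ∧ j < n ∧ j ∉ S ++ [cur] := by
      intro _
      exact ⟨cur', by omega, hnx2, hnxS'⟩
    have hcurb' : ∀ cc, (some cur' : Option Int) = some cc → 0 ≤ cc ∧ cc < max n 1 ∧ cc ∉ S ++ [cur] := by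
      intro cc he
      injection he with he; subst he
      exact ⟨by omega, by omega, hnxS'⟩
    have hB : pvStepB n ⟨S, S, cur⟩ c = some ⟨S ++ [cur], S ++ [cur], cur'⟩ := by
      unfold pvStepB
      rw [hc]
      simp only [reduceIte, haddeq]
      rw [if_neg (by decide), if_neg (by decide)]
      rw [hscan, if_pos hnx2]
    cases hPD : dnF S (cur - 1) with
    | none =>
      -- cur is the live head
      have hprvcN : st.prv cur = none := by rw [hprvc, hPD]
      refine ⟨⟨S ++ [cur], st.nxt, pvUpd st.prv cur' none, st.kv, some cur'⟩, ?_, ?_, hB⟩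
      · unfold pvStepA
        rw [hc]
        simp only [reduceIte, hcur, hnxtcN, hprvcN]
        rw [if_neg (by decide), if_neg (by decide), hstack]
      · refine ⟨rfl, rfl, hnd', hbound', hlive', hcurb', ?_⟩
        rw [hmx]
        intro i hi0 hi1
        constructor
        · show st.nxt i = cN n (S ++ [cur]) i
          rw [(hmaps i hi0 hi1).1]
          by_cases hiS : i ∈ S
          · rw [cN_insert_mem n hiS]
          · by_cases hicur : i = cur
            · subst hicur; rw [cN_insert_self n hcS]
            · rw [cN_insert_live n hcS hiS hicur hi0 (by rw [hPD]; simp)]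
        · show pvUpd st.prv cur' none i = cP (S ++ [cur]) i
          unfold pvUpd
          by_cases hinx : i = cur'
          · subst hinx
            rw [if_pos rfl]
            symm
            rw [cP_not_mem hnxS', dnF_none_iff]
            intro t ht1 ht2
            by_cases htc : t < cur
            · exact List.mem_append_left _ ((dnF_none_iff S (cur - 1)).mp hPD t (by omega) (by omega))
            · by_cases hteq : t = cur
              · subst hteq; exact List.mem_append_right _ List.mem_cons_self
              · exact List.mem_append_left _ (hnxgap t (by omega) (by omega))
          · rw [if_neg hinx, (hmaps i hi0 hi1).2]
            by_cases hiS : i ∈ S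
            · rw [cP_insert_mem hiS]
            · by_cases hicur : i = cur
              · subst hicur; rw [cP_insert_self hcS]
              · rw [cP_insert_live hcS hiS hicur hi1 hc0
                  (by rw [hN]; exact fun h => hinx (Option.some.inj h).symm)]
    | some p =>
      -- cur is in the middle
      rcases (dnF_some_iff _ _ _).mp hPD with ⟨hp1, hp0, hpS, hpgap⟩
      have hpS' : p ∉ S ++ [cur] := by
        rw [mem_app_iff]; push_neg; exact ⟨hpS, by omega⟩
      have hprvcP : st.prv cur = some p := by rw [hprvc, hPD]
      refine ⟨⟨S ++ [cur], pvUpd st.nxt p (some cur'), pvUpd st.prv cur' (some p), st.kv, some cur'⟩, ?_, ?_, hB⟩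
      · unfold pvStepA
        rw [hc]
        simp only [reduceIte, hcur, hnxtcN, hprvcP]
        rw [if_neg (by decide), if_neg (by decide), hstack]
      · refine ⟨rfl, rfl, hnd', hbound', hlive', hcurb', ?_⟩
        rw [hmx]
        intro i hi0 hi1
        constructor
        · show pvUpd st.nxt p (some cur') i = cN n (S ++ [cur]) i
          unfold pvUpd
          by_cases hip : i = p
          · subst hip
            rw [if_pos rfl]
            symm
            rw [cN_not_mem n hpS']
            refine upF_eq_of (by omega) hnx2 hnxS' ?_
            intro t ht1 ht2
            by_cases htc : t < cur
            · exact List.mem_append_left _ (hpgap t (by omega) (by omega))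
            · by_cases hteq : t = cur
              · subst hteq; exact List.mem_append_right _ List.mem_cons_self
              · exact List.mem_append_left _ (hnxgap t (by omega) (by omega))
          · rw [if_neg hip, (hmaps i hi0 hi1).1]
            by_cases hiS : i ∈ S
            · rw [cN_insert_mem n hiS]
            · by_cases hicur : i = cur
              · subst hicur; rw [cN_insert_self n hcS]
              · rw [cN_insert_live n hcS hiS hicur hi0
                  (by rw [hPD]; exact fun h => hip (Option.some.inj h).symm)]
        · show pvUpd st.prv cur' (some p) i = cP (S ++ [cur]) i
          unfold pvUpd
          by_cases hinx : i = cur'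
          · subst hinx
            rw [if_pos rfl]
            symm
            rw [cP_not_mem hnxS']
            refine dnF_eq_of (by omega) hp0 hpS' ?_
            intro t ht1 ht2
            by_cases htc : t < cur
            · exact List.mem_append_left _ (hpgap t (by omega) (by omega))
            · by_cases hteq : t = cur
              · subst hteq; exact List.mem_append_right _ List.mem_cons_self
              · exact List.mem_append_left _ (hnxgap t (by omega) (by omega))
          · rw [if_neg hinx, (hmaps i hi0 hi1).2]
            by_cases hiS : i ∈ S
            · rw [cP_insert_mem hiS]
            · by_cases hicur : i = cur
              · subst hicur; rw [cP_insert_self hcS]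
              · rw [cP_insert_live hcS hiS hicur hi1 hc0
                  (by rw [hN]; exact fun h => hinx (Option.some.inj h).symm)]
  · -- cur is the live tail; cur' = live predecessor p
    have hN : upF S n (cur + 1) = none := hNB
    have hP : dnF S (cur - 1) = some cur' := hPB
    rcases (dnF_some_iff _ _ _).mp hP with ⟨hp1, hp0, hpS, hpgap⟩
    have hpS' : cur' ∉ S ++ [cur] := by
      rw [mem_app_iff]; push_neg; exact ⟨hpS, by omega⟩
    have hN' : upF (S ++ [cur]) n (cur + 1) = none := by
      rw [upF_none_iff]
      exact fun t ht1 ht2 => List.mem_append_left _ ((upF_none_iff S n (cur + 1)).mp hN t ht1 ht2)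
    have hP' : dnF (S ++ [cur]) (cur - 1) = some cur' :=
      dnF_eq_of hp1 hp0 hpS' (fun t ht1 ht2 => List.mem_append_left _ (hpgap t ht1 ht2))
    have hnxtcN : st.nxt cur = none := by rw [hnxtc, hN]
    have hprvcP : st.prv cur = some cur' := by rw [hprvc, hP]
    have hlive' : (S ++ [cur]) ≠ [] → ∃ j, 0 ≤ j ∧ j < n ∧ j ∉ S ++ [cur] := by
      intro _
      exact ⟨cur', hp0, by omega, hpS'⟩
    have hcurb' : ∀ cc, (some cur' : Option Int) = some cc → 0 ≤ cc ∧ cc < max n 1 ∧ cc ∉ S ++ [cur] := by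
      intro cc he
      injection he with he; subst he
      exact ⟨hp0, by omega, hpS'⟩
    refine ⟨⟨S ++ [cur], pvUpd st.nxt cur' none, st.prv, st.kv - 1, some cur'⟩, ?_, ?_, ?_⟩
    · unfold pvStepA
      rw [hc]
      simp only [reduceIte, hcur, hnxtcN, hprvcP]
      rw [if_neg (by decide), if_neg (by decide), hstack]
    · refine ⟨rfl, rfl, hnd', hbound', hlive', hcurb', ?_⟩
      rw [hmx]
      intro i hi0 hi1
      constructor
      · show pvUpd st.nxt cur' none i = cN n (S ++ [cur]) i
        unfold pvUpd
        by_cases hip : i = cur'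
        · subst hip
          rw [if_pos rfl]
          symm
          rw [cN_not_mem n hpS', upF_none_iff]
          intro t ht1 ht2
          by_cases htc : t < cur
          · exact List.mem_append_left _ (hpgap t (by omega) (by omega))
          · by_cases hteq : t = cur
            · subst hteq; exact List.mem_append_right _ List.mem_cons_self
            · exact List.mem_append_left _ ((upF_none_iff S n (cur + 1)).mp hN t (by omega) ht2)
        · rw [if_neg hip, (hmaps i hi0 hi1).1]
          by_cases hiS : i ∈ S
          · rw [cN_insert_mem n hiS]
          · by_cases hicur : i = cur
            · subst hicur; rw [cN_insert_self n hcS]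
            · rw [cN_insert_live n hcS hiS hicur hi0
                (by rw [hP]; exact fun h => hip (Option.some.inj h).symm)]
      · show st.prv i = cP (S ++ [cur]) i
        rw [(hmaps i hi0 hi1).2]
        by_cases hiS : i ∈ S
        · rw [cP_insert_mem hiS]
        · by_cases hicur : i = cur
          · subst hicur; rw [cP_insert_self hcS]
          · rw [cP_insert_live hcS hiS hicur hi1 hc0 (by rw [hN]; simp)]
    · unfold pvStepB pvDown
      rw [hc]
      simp only [reduceIte, haddeq]
      rw [if_neg (by decide), if_neg (by decide)]
      rw [if_neg (scanFwd_not_lt_of_upF_none hN'), scanDown_of_dnF_some hP']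

-- ---------- the 'Z' step in lockstep ----------

theorem pvStep_Z {n : Int} {S : List Int} {curO : Option Int} {st : PvA} {c : String}
    (hInv : InvA n S curO st) (hc : c.toList.head? = some 'Z') (hne : S ≠ []) :
    ∃ st', pvStepA st c = some st' ∧ InvA n S.dropLast curO st' ∧
      ∀ curB : Int, pvStepB n ⟨S, S, curB⟩ c = some ⟨S.dropLast, S.dropLast, curB⟩ := by
  obtain ⟨hstack, hcur, hnd, hbound, hlive, hcurb, hmaps⟩ := hInv
  set S₀ := S.dropLast with hS0
  set x := S.getLast hne with hxdef
  have hSx : S₀ ++ [x] = S := List.dropLast_concat_getLast hne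
  have hgl : S.getLast? = some x := List.getLast?_eq_getLast hne
  have hnd0x : (S₀ ++ [x]).Nodup := by rw [hSx]; exact hnd
  have hxS0 : x ∉ S₀ := by
    intro hmem
    rcases List.nodup_append.mp hnd0x with ⟨_, _, hdisj⟩
    exact hdisj x hmem x List.mem_cons_self rfl
  have hnd0 : S₀.Nodup := (List.nodup_append.mp hnd0x).1
  have hxmem : x ∈ S := by rw [← hSx]; exact List.mem_append_right _ List.mem_cons_self
  rcases hbound x hxmem with ⟨hx0, hx1⟩
  have hn1 : 1 ≤ n := by omega
  have hmx : max n 1 = n := by omega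
  rw [hmx] at hcurb hmaps
  have hbound0 : ∀ s ∈ S₀, 0 ≤ s ∧ s < n := fun s hs =>
    hbound s (by rw [← hSx]; exact List.mem_append_left _ hs)
  have hupTo : upTo S x = S₀ := by rw [← hSx]; exact upTo_append_self hxS0
  have hnxtx : st.nxt x = upF S₀ n (x + 1) := by
    rw [(hmaps x hx0 hx1).1]; unfold cN; rw [hupTo]
  have hprvx : st.prv x = dnF S₀ (x - 1) := by
    rw [(hmaps x hx0 hx1).2]; unfold cP; rw [hupTo]
  obtain ⟨j, hj0, hj1, hjS⟩ := hlive hne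
  have hjS0 : j ∉ S₀ ∧ j ≠ x := by
    constructor
    · exact fun hm => hjS (by rw [← hSx]; exact List.mem_append_left _ hm)
    · exact fun he => hjS (he ▸ hxmem)
  have hdisc : PySem.Set.discard S x = S₀ := by rw [← hSx]; exact pvSet_discard_last hxS0
  have hlive0 : S₀ ≠ [] → ∃ j', 0 ≤ j' ∧ j' < n ∧ j' ∉ S₀ := by
    intro _
    exact ⟨j, hj0, hj1, hjS0.1⟩
  have hcurb0 : ∀ cc, curO = some cc → 0 ≤ cc ∧ cc < max n 1 ∧ cc ∉ S₀ := by
    intro cc he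
    rcases hcurb cc he with ⟨h1, h2, h3⟩
    exact ⟨h1, by rw [hmx]; exact h2, fun hm => h3 (by rw [← hSx]; exact List.mem_append_left _ hm)⟩
  -- live-map transport: the canonical pointers over S, rewritten over S₀ ++ [x]
  have hmapsx : ∀ i, 0 ≤ i → i < n → st.nxt i = cN n (S₀ ++ [x]) i ∧ st.prv i = cP (S₀ ++ [x]) i := by
    intro i hi0 hi1
    rw [hSx]
    exact hmaps i hi0 hi1
  have hBeq : ∀ curB : Int, pvStepB n ⟨S, S, curB⟩ c = some ⟨S₀, S₀, curB⟩ := by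
    intro curB
    unfold pvStepB
    rw [hc]
    simp only [reduceIte, hgl, hdisc]
    rw [if_neg (by decide), if_neg (by decide), if_neg (by decide)]
  cases hNx : upF S₀ n (x + 1) with
  | none =>
    obtain ⟨p, hPx⟩ : ∃ p, dnF S₀ (x - 1) = some p := by
      cases hD : dnF S₀ (x - 1) with
      | none =>
        rcases lt_trichotomy j x with h | h | h
        · exact absurd ((dnF_none_iff S₀ (x - 1)).mp hD j hj0 (by omega)) hjS0.1
        · exact absurd h hjS0.2
        · exact absurd ((upF_none_iff S₀ n (x + 1)).mp hNx j (by omega) hj1) hjS0.1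
      | some p => exact ⟨p, rfl⟩
    rcases (dnF_some_iff _ _ _).mp hPx with ⟨hp1, hp0, hpS0, hpgap⟩
    have hnxtxN : st.nxt x = none := by rw [hnxtx, hNx]
    have hprvxP : st.prv x = some p := by rw [hprvx, hPx]
    refine ⟨⟨S₀, pvUpd st.nxt p (some x), st.prv, st.kv, st.cur⟩, ?_, ?_, hBeq⟩
    · unfold pvStepA
      rw [hc]
      simp only [reduceIte, hstack, hgl, hnxtxN, hprvxP]
      rw [if_neg (by decide), if_neg (by decide), if_neg (by decide)]
    · refine ⟨rfl, hcur, hnd0, hbound0, hlive0, hcurb0, ?_⟩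
      rw [hmx]
      intro i hi0 hi1
      constructor
      · show pvUpd st.nxt p (some x) i = cN n S₀ i
        unfold pvUpd
        by_cases hip : i = p
        · subst hip
          rw [if_pos rfl]
          symm
          rw [cN_not_mem n hpS0]
          exact upF_eq_of (by omega) hx1 hxS0 (fun t ht1 ht2 => hpgap t (by omega) (by omega))
        · rw [if_neg hip, (hmapsx i hi0 hi1).1]
          by_cases hiS : i ∈ S₀
          · rw [cN_insert_mem n hiS]
          · by_cases hix : i = x
            · subst hix; rw [cN_insert_self n hxS0]
            · rw [cN_insert_live n hxS0 hiS hix hi0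
                (by rw [hPx]; exact fun h => hip (Option.some.inj h).symm)]
      · show st.prv i = cP S₀ i
        rw [(hmapsx i hi0 hi1).2]
        by_cases hiS : i ∈ S₀
        · rw [cP_insert_mem hiS]
        · by_cases hix : i = x
          · subst hix; rw [cP_insert_self hxS0]
          · rw [cP_insert_live hxS0 hiS hix hi1 hx0 (by rw [hNx]; simp)]
  | some nx =>
    rcases (upF_some_iff _ _ _ _).mp hNx with ⟨hnx1, hnx2, hnxS0, hnxgap⟩
    have hnxtxN : st.nxt x = some nx := by rw [hnxtx, hNx]
    cases hPx : dnF S₀ (x - 1) with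
    | none =>
      have hprvxN : st.prv x = none := by rw [hprvx, hPx]
      refine ⟨⟨S₀, st.nxt, pvUpd st.prv nx (some x), st.kv, st.cur⟩, ?_, ?_, hBeq⟩
      · unfold pvStepA
        rw [hc]
        simp only [reduceIte, hstack, hgl, hnxtxN, hprvxN]
        rw [if_neg (by decide), if_neg (by decide), if_neg (by decide)]
      · refine ⟨rfl, hcur, hnd0, hbound0, hlive0, hcurb0, ?_⟩
        rw [hmx]
        intro i hi0 hi1
        constructor
        · show st.nxt i = cN n S₀ i
          rw [(hmapsx i hi0 hi1).1]
          by_cases hiS : i ∈ S₀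
          · rw [cN_insert_mem n hiS]
          · by_cases hix : i = x
            · subst hix; rw [cN_insert_self n hxS0]
            · rw [cN_insert_live n hxS0 hiS hix hi0 (by rw [hPx]; simp)]
        · show pvUpd st.prv nx (some x) i = cP S₀ i
          unfold pvUpd
          by_cases hinx : i = nx
          · subst hinx
            rw [if_pos rfl]
            symm
            rw [cP_not_mem hnxS0]
            exact dnF_eq_of (by omega) hx0 hxS0 (fun t ht1 ht2 => hnxgap t (by omega) (by omega))
          · rw [if_neg hinx, (hmapsx i hi0 hi1).2]
            by_cases hix : i ∈ S₀
            · rw [cP_insert_mem hix]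
            · by_cases hix' : i = x
              · subst hix'; rw [cP_insert_self hxS0]
              · rw [cP_insert_live hxS0 hix hix' hi1 hx0
                  (by rw [hNx]; exact fun h => hinx (Option.some.inj h).symm)]
    | some p =>
      rcases (dnF_some_iff _ _ _).mp hPx with ⟨hp1, hp0, hpS0, hpgap⟩
      have hprvxP : st.prv x = some p := by rw [hprvx, hPx]
      refine ⟨⟨S₀, pvUpd st.nxt p (some x), pvUpd st.prv nx (some x), st.kv, st.cur⟩, ?_, ?_, hBeq⟩
      · unfold pvStepA
        rw [hc]
        simp only [reduceIte, hstack, hgl, hnxtxN, hprvxP]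
        rw [if_neg (by decide), if_neg (by decide), if_neg (by decide)]
      · refine ⟨rfl, hcur, hnd0, hbound0, hlive0, hcurb0, ?_⟩
        rw [hmx]
        intro i hi0 hi1
        constructor
        · show pvUpd st.nxt p (some x) i = cN n S₀ i
          unfold pvUpd
          by_cases hip : i = p
          · subst hip
            rw [if_pos rfl]
            symm
            rw [cN_not_mem n hpS0]
            exact upF_eq_of (by omega) hx1 hxS0 (fun t ht1 ht2 => hpgap t (by omega) (by omega))
          · rw [if_neg hip, (hmapsx i hi0 hi1).1]
            by_cases hiS : i ∈ S₀
            · rw [cN_insert_mem n hiS]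
            · by_cases hix : i = x
              · subst hix; rw [cN_insert_self n hxS0]
              · rw [cN_insert_live n hxS0 hiS hix hi0
                  (by rw [hPx]; exact fun h => hip (Option.some.inj h).symm)]
        · show pvUpd st.prv nx (some x) i = cP S₀ i
          unfold pvUpd
          by_cases hinx : i = nx
          · subst hinx
            rw [if_pos rfl]
            symm
            rw [cP_not_mem hnxS0]
            exact dnF_eq_of (by omega) hx0 hxS0 (fun t ht1 ht2 => hnxgap t (by omega) (by omega))
          · rw [if_neg hinx, (hmapsx i hi0 hi1).2]
            by_cases hiS : i ∈ S₀
            · rw [cP_insert_mem hiS]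
            · by_cases hix : i = x
              · subst hix; rw [cP_insert_self hxS0]
              · rw [cP_insert_live hxS0 hiS hix hi1 hx0
                  (by rw [hNx]; exact fun h => hinx (Option.some.inj h).symm)]

-- ---------- the U/D move loops in lockstep ----------

theorem pvLoopU_lock (n : Int) (S : List Int) :
    ∀ (fuel : Nat) (t c : Int) (st : PvA) (cur' : Option Int),
    t.toNat = fuel → 0 ≤ t →
    st.cur = some c → 0 ≤ c → c < max n 1 → c ∉ S →
    (∀ i, 0 ≤ i → i < max n 1 → st.nxt i = cN n S i ∧ st.prv i = cP S i) →
    pvIter (pvPrevL S) t.toNat c = some cur' →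
    ∃ st', pvLoopU t st = some st' ∧
      st'.stack = st.stack ∧ st'.nxt = st.nxt ∧ st'.prv = st.prv ∧ st'.cur = cur' ∧
      (∀ c', cur' = some c' → pvLoopBU S t c = c' ∧ 0 ≤ c' ∧ c' < max n 1 ∧ c' ∉ S) := by
  intro fuel
  induction fuel with
  | zero =>
    intro t c st cur' hf ht hcur hc0 hc1 hcS hmaps hit
    have ht0 : t = 0 := by omega
    subst ht0
    simp only [Int.toNat_zero, pvIter] at hit
    injection hit with hit
    refine ⟨st, by rw [pvLoopU.eq_def, if_neg (by omega)], rfl, rfl, rfl, by rw [hcur]; exact hit, ?_⟩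
    intro c' he
    rw [← hit] at he
    injection he with he; subst he
    rw [pvLoopBU.eq_def, if_neg (by omega)]
    exact ⟨rfl, hc0, hc1, hcS⟩
  | succ fuel ih =>
    intro t c st cur' hf ht hcur hc0 hc1 hcS hmaps hit
    have ht1 : 0 < t := by omega
    have hfe : t.toNat = fuel + 1 := hf
    rw [hfe] at hit
    simp only [pvIter] at hit
    have hprvc : st.prv c = dnF S (c - 1) := by
      rw [(hmaps c hc0 hc1).2, cP_not_mem hcS]
    cases hD : pvPrevL S c with
    | some c2 =>
      rw [hD] at hit
      have hD' : dnF S (c - 1) = some c2 := by rw [← pvPrevL_eq]; exact hD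
      rcases (dnF_some_iff S (c - 1) c2).mp hD' with ⟨hp1, hp0, hpS, _⟩
      have hscan : pvDown S c = c2 := scanDown_of_dnF_some hD'
      have hst2cur : ({ st with cur := st.prv c, kv := st.kv - 1 } : PvA).cur = some c2 := by
        show st.prv c = some c2
        rw [hprvc]; exact hD'
      have hftn : (t - 1).toNat = fuel := by omega
      obtain ⟨st', hA, he1, he2, he3, he4, hB⟩ := ih (t - 1) c2
        { st with cur := st.prv c, kv := st.kv - 1 } cur' hftn (by omega) hst2cur
        hp0 (by omega) hpS hmaps (by rw [hftn]; exact hit)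
      refine ⟨st', ?_, he1, he2, he3, he4, ?_⟩
      · rw [pvLoopU.eq_def, if_pos ht1, hcur]
        exact hA
      · intro c' he
        rcases hB c' he with ⟨hb1, hb2, hb3, hb4⟩
        refine ⟨?_, hb2, hb3, hb4⟩
        rw [pvLoopBU.eq_def, if_pos ht1, hscan]
        exact hb1
    | none =>
      rw [hD] at hit
      have hD' : dnF S (c - 1) = none := by rw [← pvPrevL_eq]; exact hD
      have hfz : fuel = 0 := by
        by_contra hne
        rw [if_neg hne] at hit
        cases hit
      rw [hfz, if_pos rfl] at hit
      injection hit with hit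
      subst hfz
      have ht01 : t = 1 := by omega
      subst ht01
      have hprvcN : st.prv c = none := by rw [hprvc]; exact hD'
      refine ⟨{ st with cur := st.prv c, kv := st.kv - 1 }, ?_, rfl, rfl, rfl, ?_, ?_⟩
      · rw [pvLoopU.eq_def, if_pos (by omega), hcur]
        show pvLoopU (1 - 1) { st with cur := st.prv c, kv := st.kv - 1 }
          = some { st with cur := st.prv c, kv := st.kv - 1 }
        rw [pvLoopU.eq_def, if_neg (by omega)]
      · show st.prv c = cur'
        rw [hprvcN, ← hit]
      · intro c' he
        rw [← hit] at he
        cases he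
    
theorem pvLoopD_lock (n : Int) (S : List Int) :
    ∀ (fuel : Nat) (t c : Int) (st : PvA) (cur' : Option Int),
    t.toNat = fuel → 0 ≤ t →
    st.cur = some c → 0 ≤ c → c < max n 1 → c ∉ S →
    (∀ i, 0 ≤ i → i < max n 1 → st.nxt i = cN n S i ∧ st.prv i = cP S i) →
    pvIter (pvNextL n S) t.toNat c = some cur' →
    ∃ st', pvLoopD t st = some st' ∧
      st'.stack = st.stack ∧ st'.nxt = st.nxt ∧ st'.prv = st.prv ∧ st'.cur = cur' ∧
      (∀ c', cur' = some c' → pvLoopBD S t c = c' ∧ 0 ≤ c' ∧ c' < max n 1 ∧ c' ∉ S) := by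
  intro fuel
  induction fuel with
  | zero =>
    intro t c st cur' hf ht hcur hc0 hc1 hcS hmaps hit
    have ht0 : t = 0 := by omega
    subst ht0
    simp only [Int.toNat_zero, pvIter] at hit
    injection hit with hit
    refine ⟨st, by rw [pvLoopD.eq_def, if_neg (by omega)], rfl, rfl, rfl, by rw [hcur]; exact hit, ?_⟩
    intro c' he
    rw [← hit] at he
    injection he with he; subst he
    rw [pvLoopBD.eq_def, if_neg (by omega)]
    exact ⟨rfl, hc0, hc1, hcS⟩
  | succ fuel ih =>
    intro t c st cur' hf ht hcur hc0 hc1 hcS hmaps hit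
    have ht1 : 0 < t := by omega
    have hfe : t.toNat = fuel + 1 := hf
    rw [hfe] at hit
    simp only [pvIter] at hit
    have hnxtc : st.nxt c = upF S n (c + 1) := by
      rw [(hmaps c hc0 hc1).1, cN_not_mem n hcS]
    cases hD : pvNextL n S c with
    | some c2 =>
      rw [hD] at hit
      have hD' : upF S n (c + 1) = some c2 := by rw [← pvNextL_eq]; exact hD
      rcases (upF_some_iff S n (c + 1) c2).mp hD' with ⟨hp1, hp2, hpS, _⟩
      have hscan : pvUp S c = c2 := scanUp_of_upF_some hD'
      have hst2cur : ({ st with cur := st.nxt c, kv := st.kv + 1 } : PvA).cur = some c2 := by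
        show st.nxt c = some c2
        rw [hnxtc]; exact hD'
      have hftn : (t - 1).toNat = fuel := by omega
      obtain ⟨st', hA, he1, he2, he3, he4, hB⟩ := ih (t - 1) c2
        { st with cur := st.nxt c, kv := st.kv + 1 } cur' hftn (by omega) hst2cur
        (by omega) (by omega) hpS hmaps (by rw [hftn]; exact hit)
      refine ⟨st', ?_, he1, he2, he3, he4, ?_⟩
      · rw [pvLoopD.eq_def, if_pos ht1, hcur]
        exact hA
      · intro c' he
        rcases hB c' he with ⟨hb1, hb2, hb3, hb4⟩
        refine ⟨?_, hb2, hb3, hb4⟩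
        rw [pvLoopBD.eq_def, if_pos ht1, hscan]
        exact hb1
    | none =>
      rw [hD] at hit
      have hD' : upF S n (c + 1) = none := by rw [← pvNextL_eq]; exact hD
      have hfz : fuel = 0 := by
        by_contra hne
        rw [if_neg hne] at hit
        cases hit
      rw [hfz, if_pos rfl] at hit
      injection hit with hit
      subst hfz
      have ht01 : t = 1 := by omega
      subst ht01
      have hnxtcN : st.nxt c = none := by rw [hnxtc]; exact hD'
      refine ⟨{ st with cur := st.nxt c, kv := st.kv + 1 }, ?_, rfl, rfl, rfl, ?_, ?_⟩
      · rw [pvLoopD.eq_def, if_pos (by omega), hcur]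
        show pvLoopD (1 - 1) { st with cur := st.nxt c, kv := st.kv + 1 }
          = some { st with cur := st.nxt c, kv := st.kv + 1 }
        rw [pvLoopD.eq_def, if_neg (by omega)]
      · show st.nxt c = cur'
        rw [hnxtcN, ← hit]
      · intro c' he
        rw [← hit] at he
        cases he

-- ---------- running a whole command list ----------

theorem pv_head_some_of_ok {n : Int} {S : List Int} {curO : Option Int} {c : String} {r : List String}
    (hok : pvOk n S curO (c :: r) = true) : ∃ ch, c.toList.head? = some ch := by
  cases h : c.toList.head? with
  | none =>
    exfalso
    simp only [pvOk, h] at hok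
    exact absurd hok (by decide)
  | some ch => exact ⟨ch, rfl⟩

theorem pv_run (n : Int) : ∀ (cmd : List String) (S : List Int) (curO : Option Int) (stA : PvA) (curB : Int),
    InvA n S curO stA → (∀ cc, curO = some cc → curB = cc) →
    pvOk n S curO cmd = true →
    ∃ S' curO' stA' curB',
      cmd.foldl (fun ost c => ost.bind (fun st => pvStepA st c)) (some stA) = some stA' ∧
      cmd.foldl (fun ost c => ost.bind (fun st => pvStepB n st c)) (some ⟨S, S, curB⟩)
        = some ⟨S', S', curB'⟩ ∧
      InvA n S' curO' stA' := by
  intro cmd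
  induction cmd with
  | nil => exact fun S curO stA curB hInv _ _ => ⟨S, curO, stA, curB, rfl, rfl, hInv⟩
  | cons c r ih =>
    intro S curO stA curB hInv hrel hok
    obtain ⟨ch, hhd⟩ := pv_head_some_of_ok hok
    simp only [pvOk, hhd] at hok
    have hInv' := hInv
    obtain ⟨hstack, hcur, hnd, hbound, hlive, hcurb, hmaps⟩ := hInv'
    by_cases hU : ch = 'U'
    · subst hU
      rw [if_pos rfl] at hok
      cases hof : PySem.Int.ofChars? (c.toList.drop 2) with
      | none => simp only [hof] at hok; exact absurd hok (by decide)
      | some t =>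
        simp only [hof] at hok
        by_cases ht : t ≤ 0
        · rw [if_pos ht] at hok
          have hA1 : pvStepA stA c = some stA := by
            unfold pvStepA
            rw [hhd]
            simp only [reduceIte, hof]
            rw [pvLoopU.eq_def, if_neg (by omega)]
          have hB1 : pvStepB n ⟨S, S, curB⟩ c = some ⟨S, S, curB⟩ := by
            unfold pvStepB
            rw [hhd]
            simp only [reduceIte, hof]
            rw [pvLoopBU.eq_def, if_neg (by omega)]
          obtain ⟨S', curO', stA', curB', hA, hB, hI⟩ := ih S curO stA curB hInv hrel hok
          exact ⟨S', curO', stA', curB', by simpa only [List.foldl_cons, Option.bind_some, hA1] using hA,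
            by simpa only [List.foldl_cons, Option.bind_some, hB1] using hB, hI⟩
        · rw [if_neg ht] at hok
          cases hco : curO with
          | none => simp only [hco] at hok; exact absurd hok (by decide)
          | some cc =>
            simp only [hco] at hok
            cases hiter : pvIter (pvPrevL S) t.toNat cc with
            | none => simp only [hiter] at hok; exact absurd hok (by decide)
            | some cur' =>
              simp only [hiter] at hok
              rcases hcurb cc hco with ⟨hc0, hc1, hcS⟩
              have hcurs : stA.cur = some cc := by rw [hcur, hco]
              obtain ⟨st1, hA1, he1, he2, he3, he4, hBv⟩ := pvLoopU_lock n S t.toNat t cc stA cur'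
                rfl (by omega) hcurs hc0 hc1 hcS hmaps hiter
              have hrelcb : curB = cc := hrel cc hco
              rw [hrelcb]
              have hInv1 : InvA n S cur' st1 := by
                refine ⟨by rw [he1, hstack], he4, hnd, hbound, hlive, ?_, ?_⟩
                · intro c' he
                  rcases hBv c' he with ⟨_, h2, h3, h4⟩
                  exact ⟨h2, h3, h4⟩
                · intro i hi0 hi1
                  rw [he2, he3]
                  exact hmaps i hi0 hi1
              have hrel1 : ∀ cc', cur' = some cc' → pvLoopBU S t cc = cc' := by
                intro cc' he
                exact (hBv cc' he).1
              obtain ⟨S', curO', stA', curB', hA, hB, hI⟩ :=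
                ih S cur' st1 (pvLoopBU S t cc) hInv1 hrel1 hok
              have hA1' : pvStepA stA c = some st1 := by
                unfold pvStepA
                rw [hhd]
                simp only [reduceIte, hof]
                exact hA1
              have hB1 : pvStepB n ⟨S, S, cc⟩ c = some ⟨S, S, pvLoopBU S t cc⟩ := by
                unfold pvStepB
                rw [hhd]
                simp only [reduceIte, hof]
              exact ⟨S', curO', stA', curB', by simpa only [List.foldl_cons, Option.bind_some, hA1'] using hA,
                by simpa only [List.foldl_cons, Option.bind_some, hB1] using hB, hI⟩
    · rw [if_neg hU] at hok
      by_cases hD : ch = 'D'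
      · subst hD
        rw [if_pos rfl] at hok
        cases hof : PySem.Int.ofChars? (c.toList.drop 2) with
        | none => simp only [hof] at hok; exact absurd hok (by decide)
        | some t =>
          simp only [hof] at hok
          by_cases ht : t ≤ 0
          · rw [if_pos ht] at hok
            have hA1 : pvStepA stA c = some stA := by
              unfold pvStepA
              rw [hhd]
              simp only [reduceIte, hof]
              rw [if_neg (by decide)]
              rw [pvLoopD.eq_def, if_neg (by omega)]
            have hB1 : pvStepB n ⟨S, S, curB⟩ c = some ⟨S, S, curB⟩ := by
              unfold pvStepB
              rw [hhd]
              simp only [reduceIte, hof]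
              rw [if_neg (by decide)]
              rw [pvLoopBD.eq_def, if_neg (by omega)]
            obtain ⟨S', curO', stA', curB', hA, hB, hI⟩ := ih S curO stA curB hInv hrel hok
            exact ⟨S', curO', stA', curB', by simpa only [List.foldl_cons, Option.bind_some, hA1] using hA,
              by simpa only [List.foldl_cons, Option.bind_some, hB1] using hB, hI⟩
          · rw [if_neg ht] at hok
            cases hco : curO with
            | none => simp only [hco] at hok; exact absurd hok (by decide)
            | some cc =>
              simp only [hco] at hok
              cases hiter : pvIter (pvNextL n S) t.toNat cc with
              | none => simp only [hiter] at hok; exact absurd hok (by decide)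
              | some cur' =>
                simp only [hiter] at hok
                rcases hcurb cc hco with ⟨hc0, hc1, hcS⟩
                have hcurs : stA.cur = some cc := by rw [hcur, hco]
                obtain ⟨st1, hA1, he1, he2, he3, he4, hBv⟩ := pvLoopD_lock n S t.toNat t cc stA cur'
                  rfl (by omega) hcurs hc0 hc1 hcS hmaps hiter
                have hrelcb : curB = cc := hrel cc hco
                rw [hrelcb]
                have hInv1 : InvA n S cur' st1 := by
                  refine ⟨by rw [he1, hstack], he4, hnd, hbound, hlive, ?_, ?_⟩
                  · intro c' he
                    rcases hBv c' he with ⟨_, h2, h3, h4⟩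
                    exact ⟨h2, h3, h4⟩
                  · intro i hi0 hi1
                    rw [he2, he3]
                    exact hmaps i hi0 hi1
                have hrel1 : ∀ cc', cur' = some cc' → pvLoopBD S t cc = cc' := by
                  intro cc' he
                  exact (hBv cc' he).1
                obtain ⟨S', curO', stA', curB', hA, hB, hI⟩ :=
                  ih S cur' st1 (pvLoopBD S t cc) hInv1 hrel1 hok
                have hA1' : pvStepA stA c = some st1 := by
                  unfold pvStepA
                  rw [hhd]
                  simp only [reduceIte, hof]
                  rw [if_neg (by decide)]
                  exact hA1
                have hB1 : pvStepB n ⟨S, S, cc⟩ c = some ⟨S, S, pvLoopBD S t cc⟩ := by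
                  unfold pvStepB
                  rw [hhd]
                  simp only [reduceIte, hof]
                  rw [if_neg (by decide)]
                exact ⟨S', curO', stA', curB', by simpa only [List.foldl_cons, Option.bind_some, hA1'] using hA,
                  by simpa only [List.foldl_cons, Option.bind_some, hB1] using hB, hI⟩
      · rw [if_neg hD] at hok
        by_cases hC : ch = 'C'
        · subst hC
          rw [if_pos rfl] at hok
          cases hco : curO with
          | none => simp only [hco] at hok; exact absurd hok (by decide)
          | some cc =>
            simp only [hco] at hok
            have hrelcb : curB = cc := hrel cc hco
            rw [hrelcb]
            have hInvc : InvA n S (some cc) stA := by rw [← hco]; exact hInv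
            cases hN : pvNextL n S cc with
            | some j =>
              simp only [hN] at hok
              obtain ⟨st1, hA1, hI1, hB1⟩ := pvStep_C hInvc hhd (Or.inl hN)
              have hrel1 : ∀ cc', (some j : Option Int) = some cc' → j = cc' := by
                intro cc' he
                injection he
              obtain ⟨S', curO', stA', curB', hA, hB, hI⟩ :=
                ih (S ++ [cc]) (some j) st1 j hI1 hrel1 hok
              exact ⟨S', curO', stA', curB', by simpa only [List.foldl_cons, Option.bind_some, hA1] using hA,
                by simpa only [List.foldl_cons, Option.bind_some, hB1] using hB, hI⟩
            | none =>
              simp only [hN] at hok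
              cases hP : pvPrevL S cc with
              | none => simp only [hP] at hok; exact absurd hok (by decide)
              | some p =>
                simp only [hP] at hok
                obtain ⟨st1, hA1, hI1, hB1⟩ := pvStep_C hInvc hhd (Or.inr ⟨hN, hP⟩)
                have hrel1 : ∀ cc', (some p : Option Int) = some cc' → p = cc' := by
                  intro cc' he
                  injection he
                obtain ⟨S', curO', stA', curB', hA, hB, hI⟩ :=
                  ih (S ++ [cc]) (some p) st1 p hI1 hrel1 hok
                exact ⟨S', curO', stA', curB', by simpa only [List.foldl_cons, Option.bind_some, hA1] using hA,
                  by simpa only [List.foldl_cons, Option.bind_some, hB1] using hB, hI⟩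
        · rw [if_neg hC] at hok
          by_cases hZ : ch = 'Z'
          · subst hZ
            rw [if_pos rfl] at hok
            cases hgl : S.getLast? with
            | none => simp only [hgl] at hok; exact absurd hok (by decide)
            | some x =>
              simp only [hgl] at hok
              have hne : S ≠ [] := by
                intro he
                subst he
                simp at hgl
              obtain ⟨st1, hA1, hI1, hB1⟩ := pvStep_Z hInv hhd hne
              obtain ⟨S', curO', stA', curB', hA, hB, hI⟩ :=
                ih S.dropLast curO st1 curB hI1
                  (by intro cc he
                      exact hrel cc he) hok
              exact ⟨S', curO', stA', curB', by simpa only [List.foldl_cons, Option.bind_some, hA1] using hA,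
                by simpa only [List.foldl_cons, Option.bind_some, hB1 curB] using hB, hI⟩
          · rw [if_neg hZ] at hok
            have hA1 := pvStepA_junk (st := stA) hhd hU hD hC hZ
            have hB1 := pvStepB_junk (n := n) (st := ⟨S, S, curB⟩) hhd hU hD hC hZ
            obtain ⟨S', curO', stA', curB', hA, hB, hI⟩ := ih S curO stA curB hInv hrel hok
            exact ⟨S', curO', stA', curB', by simpa only [List.foldl_cons, Option.bind_some, hA1] using hA,
              by simpa only [List.foldl_cons, Option.bind_some, hB1] using hB, hI⟩

-- ---------- initial state ----------

theorem InvA_init (n k : Int) (hk : k ≤ max n 1) :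
    InvA n [] (if k < max n 1 then some (max k 0) else none)
      ⟨[], (pvBuild n).1, (pvBuild n).2, k, if k < max n 1 then some (max k 0) else none⟩ := by
  refine ⟨rfl, rfl, List.nodup_nil, by simp, by intro h; exact absurd rfl h, ?_, ?_⟩
  · intro cc he
    by_cases hkm : k < max n 1
    · rw [if_pos hkm] at he
      injection he with he
      subst he
      refine ⟨by omega, by omega, by simp⟩
    · rw [if_neg hkm] at he
      cases he
  · intro i hi0 hi1
    constructor
    · show (pvBuild n).1 i = cN n [] i
      rw [pvBuild_nxt, cN_not_mem n (by simp)]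
      by_cases h : i + 1 < n
      · rw [if_pos (by omega)]
        symm
        exact upF_eq_of (le_refl _) h (by simp) (by omega)
      · rw [if_neg (by omega)]
        symm
        rw [upF_none_iff]
        intro t h1 h2; omega
    · show (pvBuild n).2 i = cP [] i
      rw [pvBuild_prv, cP_not_mem (by simp)]
      by_cases h : 1 ≤ i
      · rw [if_pos (by omega)]
        symm
        exact dnF_eq_of (le_refl _) (by omega) (by simp) (by omega)
      · rw [if_neg (by omega)]
        symm
        rw [dnF_none_iff]
        intro t h1 h2; omega

theorem pvSet_empty_eq : (PySem.Set.empty : PySem.Set Int) = ([] : List Int) := rfl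

-- ===== VERDICT (by name: the statement is the Claim_ definition above) =====
theorem solution_spec : Claim_equal_solution := by
  unfold Claim_equal_solution
  intro n k cmd _hdom hpre
  unfold Spec_solution
  rcases hpre with ⟨hk, hok⟩
  unfold solution solution_alt
  rw [pvSet_empty_eq]
  rw [pvWalk_init n k hk]
  have hInit := InvA_init n k hk
  have hrel : ∀ cc, (if k < max n 1 then some (max k 0) else none) = some cc → max k 0 = cc := by
    intro cc he
    by_cases hkm : k < max n 1
    · rw [if_pos hkm] at he
      injection he with he
    · rw [if_neg hkm] at he
      cases he
  obtain ⟨S', curO', stA', curB', hA, hB, hI⟩ :=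
    pv_run n cmd [] (if k < max n 1 then some (max k 0) else none)
      ⟨[], (pvBuild n).1, (pvBuild n).2, k, if k < max n 1 then some (max k 0) else none⟩
      (max k 0) hInit hrel hok
  obtain ⟨hstack', -, -, hbound', -, -, -⟩ := hI
  have hr := pvRender_eq n S' hbound'
  simp only [hA, hB, hstack', hr]
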